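-- pv_equiv track=rewrite | github.com/MAInformatico/AdventOfCode2022 | day3/day3_part2.py | getCommonValue
-- ===== SOURCE A (Python) =====
-- def getCommonValue(first,second,third):
--     result = ''
--     for i in range(len(first)):
--         for j in range(len(second)):
--             for k in range(len(third)):
--                 if first[i] == second[j] == third[k]:
--                     result = first[i]
--                     break
--     return result
-- ===== SOURCE B (Python) =====
-- def getCommonValue(first, second, third):
--     common = set(second) & set(third)
--     result = ''
--     for c in first:
--         if c in common:
--             result = c
--     return result
-- ===== Notes on version B (the rewrite author's own statement) =====
-- stated objective: faster
-- what changed: Replaced the triple nested index loop by a precomputed set intersection of second and third and a single scan of first keeping the last member.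
import Mathlib
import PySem

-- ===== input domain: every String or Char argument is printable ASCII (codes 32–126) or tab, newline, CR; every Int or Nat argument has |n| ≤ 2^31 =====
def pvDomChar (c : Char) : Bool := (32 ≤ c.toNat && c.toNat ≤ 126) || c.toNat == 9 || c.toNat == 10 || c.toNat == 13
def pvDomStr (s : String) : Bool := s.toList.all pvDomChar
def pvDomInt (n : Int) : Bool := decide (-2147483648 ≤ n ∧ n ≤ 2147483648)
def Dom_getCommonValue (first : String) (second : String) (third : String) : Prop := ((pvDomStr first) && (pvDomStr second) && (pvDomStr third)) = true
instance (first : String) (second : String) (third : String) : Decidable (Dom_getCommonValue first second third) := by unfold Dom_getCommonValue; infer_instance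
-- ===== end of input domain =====

-- B replaces A's triple nested loop by a precomputed set intersection of second and third
-- and one scan of first keeping the last member (objective: faster, asymptotic).

-- ===== PORT A =====
-- inner 'for k in range(len(third))' with its break at the first match
def gcvLoopK (fi sj : Char) (ts : List Char) (res : String) : String :=
  match ts with
  | [] => res
  | tk :: rest => if fi = sj ∧ sj = tk then String.ofList [fi] else gcvLoopK fi sj rest res

def getCommonValue (first : String) (second : String) (third : String) : String :=
  first.toList.foldl
    (fun res fi =>
      second.toList.foldl (fun r sj => gcvLoopK fi sj third.toList r) res)
    ""

-- ===== PORT B =====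
def getCommonValue_alt (first : String) (second : String) (third : String) : String :=
  let common : PySem.Set Char :=
    PySem.Set.inter (PySem.Set.ofList second.toList) (PySem.Set.ofList third.toList)
  first.toList.foldl (fun res c => if PySem.Set.contains common c then String.ofList [c] else res) ""

-- ===== PRECONDITION & SPEC =====
def Spec_getCommonValue (first : String) (second : String) (third : String) (out : String) : Prop := out = getCommonValue_alt first second third
instance (first : String) (second : String) (third : String) (out : String) : Decidable (Spec_getCommonValue first second third out) := by unfold Spec_getCommonValue; infer_instance

-- ===== CLAIM (what is proved, stated in full; the proofs are below) =====
def Claim_equal_getCommonValue : Prop := ∀ (first : String) (second : String) (third : String), Dom_getCommonValue first second third → Spec_getCommonValue first second third (getCommonValue first second third)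

-- ===== LEMMAS AND PROOFS =====

theorem gcvLoopK_eq (fi sj : Char) (ts : List Char) (res : String) :
    gcvLoopK fi sj ts res = if fi = sj ∧ sj ∈ ts then String.ofList [fi] else res := by
  induction ts with
  | nil => simp [gcvLoopK]
  | cons tk rest ih =>
    simp only [gcvLoopK, ih, List.mem_cons]
    by_cases h1 : fi = sj <;> by_cases h2 : sj = tk <;> by_cases h3 : sj ∈ rest <;>
      simp_all

theorem gcvMid_eq (fi : Char) (ss ts : List Char) (res : String) :
    ss.foldl (fun r sj => gcvLoopK fi sj ts r) res
      = if fi ∈ ss ∧ fi ∈ ts then String.ofList [fi] else res := by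
  induction ss generalizing res with
  | nil => simp
  | cons sj ss ih =>
    rw [List.foldl_cons, ih, gcvLoopK_eq]
    simp only [List.mem_cons]
    by_cases h1 : fi = sj <;> by_cases h2 : fi ∈ ss <;> by_cases h3 : fi ∈ ts <;>
      simp_all

-- ===== VERDICT (by name: the statement is the Claim_ definition above) =====
theorem getCommonValue_spec : Claim_equal_getCommonValue := by
  unfold Claim_equal_getCommonValue Spec_getCommonValue
  intro first second third _
  unfold getCommonValue getCommonValue_alt
  simp only [gcvMid_eq]
  congr 1
  funext res c
  have : (PySem.Set.contains
      (PySem.Set.inter (PySem.Set.ofList second.toList) (PySem.Set.ofList third.toList)) c)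
      = decide (c ∈ second.toList ∧ c ∈ third.toList) := by
    simp [PySem.Set.contains_eq_listContains, PySem.Set.mem_inter, PySem.Set.mem_ofList]
  rw [this]
  by_cases h : c ∈ second.toList ∧ c ∈ third.toList <;> simp [h]
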